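-- pv_equiv track=rewrite | github.com/Enlightenment94/note-blinker | src/gui/app.py | _map_blocks
-- ===== SOURCE A (Python) =====
-- def _map_blocks(content):
--     # Podziel tekst na bloki (oddzielone pustymi liniami)
--     blocks = []
--     current_block = []
--     block_number = 1
--
--     for line in content.split('\n'):
--         if line.strip():  # Jeśli linia nie jest pusta
--             current_block.append(line)
--         elif current_block:  # Jeśli mamy zebrany blok i trafiliśmy na pustą linię
--             block_text = '\n'.join(current_block)
--             tag = f"note_{block_number}"
--             blocks.append(f"<{tag}>\n{block_text}\n</{tag}>")
--             current_block = []
--             block_number += 1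
--
--     # Dodaj ostatni blok jeśli istnieje
--     if current_block:
--         block_text = '\n'.join(current_block)
--         tag = f"note_{block_number}"
--         blocks.append(f"<{tag}>\n{block_text}\n</{tag}>")
--
--     return blocks
-- ===== SOURCE B (Python) =====
-- def _map_blocks(content):
--     # Group-then-wrap: first collect the runs of non-blank lines, then
--     # number and wrap them in a separate enumerate pass (no flush branch,
--     # no duplicated tail handling).
--     runs = []
--     in_run = False
--     for line in content.split('\n'):
--         if line.strip():
--             if in_run:
--                 runs[-1].append(line)
--             else:
--                 runs.append([line])
--                 in_run = True
--         else:
--             in_run = False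
--     return [f"<note_{k}>\n" + "\n".join(r) + f"\n</note_{k}>"
--             for k, r in enumerate(runs, 1)]
-- ===== Notes on version B (the rewrite author's own statement) =====
-- stated objective: idiomatic
-- what changed: Replaces A's accumulate-and-flush loop (current_block buffer, in-loop counter, duplicated final-block flush) by a group-then-wrap decomposition: one pass groups lines into runs of non-blank lines, then a single enumerate pass numbers and wraps the runs.
import Mathlib
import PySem

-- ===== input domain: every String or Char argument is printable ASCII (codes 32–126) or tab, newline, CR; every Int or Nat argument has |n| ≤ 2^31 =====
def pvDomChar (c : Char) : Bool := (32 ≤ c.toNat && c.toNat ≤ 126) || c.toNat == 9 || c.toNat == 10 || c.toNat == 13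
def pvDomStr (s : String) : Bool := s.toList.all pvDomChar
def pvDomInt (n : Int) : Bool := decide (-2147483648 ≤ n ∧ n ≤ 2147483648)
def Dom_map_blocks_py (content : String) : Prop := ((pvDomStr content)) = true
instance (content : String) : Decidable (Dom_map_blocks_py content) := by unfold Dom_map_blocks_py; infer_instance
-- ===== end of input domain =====

-- B replaces A's accumulate-and-flush loop by a group-then-wrap decomposition (more idiomatic, same cost).

-- shared helper: content.split('\n') (sep is non-empty, so Python never raises)
def mbLines (content : String) : List String :=
  (PySem.Chars.splitOn content.toList ['\n']).map (fun cs => String.ofList cs)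

-- shared helper: the f-string f"<{tag}>\n{text}\n</{tag}>" with tag = f"note_{num}"
def mbWrap (num : Int) (text : String) : String :=
  let tag := "note_" ++ PySem.Int.toStr num
  "<" ++ tag ++ ">\n" ++ text ++ "\n</" ++ tag ++ ">"

-- ===== PORT A =====
-- A's loop body: state = (blocks, current_block, block_number)
def mbStepA (st : List String × List String × Int) (line : String) :
    List String × List String × Int :=
  if PySem.Str.strip line ≠ "" then (st.1, st.2.1 ++ [line], st.2.2)
  else if st.2.1 ≠ [] then
    (st.1 ++ [mbWrap st.2.2 (PySem.Str.join "\n" st.2.1)], [], st.2.2 + 1)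
  else st

def map_blocks_py (content : String) : List String :=
  let st := (mbLines content).foldl mbStepA ([], [], 1)
  if st.2.1 ≠ [] then st.1 ++ [mbWrap st.2.2 (PySem.Str.join "\n" st.2.1)] else st.1

-- ===== PORT B =====
-- runs[-1].append(line): append to the last run
def mbAppendLast : List (List String) → String → List (List String)
  | [], _ => []
  | [r], line => [r ++ [line]]
  | r :: rs, line => r :: mbAppendLast rs line

-- B's grouping loop body: state = (runs, in_run)
def mbStepB (st : List (List String) × Bool) (line : String) :
    List (List String) × Bool :=
  if PySem.Str.strip line ≠ "" then
    if st.2 then (mbAppendLast st.1 line, true) else (st.1 ++ [[line]], true)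
  else (st.1, false)

-- [f"<note_{k}>…" for k, r in enumerate(runs, 1)]
def mbWrapFrom (k : Int) : List (List String) → List String
  | [] => []
  | r :: rs => mbWrap k (PySem.Str.join "\n" r) :: mbWrapFrom (k + 1) rs

def map_blocks_py_alt (content : String) : List String :=
  let st := (mbLines content).foldl mbStepB ([], false)
  mbWrapFrom 1 st.1

-- ===== PRECONDITION & SPEC =====
def Spec_map_blocks_py (content : String) (out : List String) : Prop := out = map_blocks_py_alt content
instance (content : String) (out : List String) : Decidable (Spec_map_blocks_py content out) := by unfold Spec_map_blocks_py; infer_instance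

-- ===== CLAIM (what is proved, stated in full; the proofs are below) =====
def Claim_equal_map_blocks_py : Prop := ∀ (content : String), Dom_map_blocks_py content → Spec_map_blocks_py content (map_blocks_py content)

-- ===== LEMMAS AND PROOFS =====

lemma mbAppendLast_snoc (init : List (List String)) (r : List String) (line : String) :
    mbAppendLast (init ++ [r]) line = init ++ [r ++ [line]] := by
  induction init with
  | nil => rfl
  | cons a as ih =>
      cases as with
      | nil => simp [mbAppendLast]
      | cons b bs => simpa [mbAppendLast] using ih

lemma mbWrapFrom_snoc (k : Int) (xs : List (List String)) (x : List String) :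
    mbWrapFrom k (xs ++ [x]) = mbWrapFrom k xs ++ [mbWrap (k + xs.length) (PySem.Str.join "\n" x)] := by
  induction xs generalizing k with
  | nil => simp [mbWrapFrom]
  | cons a as ih =>
      simp only [List.cons_append, mbWrapFrom, ih, List.length_cons]
      have h : k + 1 + (as.length : Int) = k + ((as.length : Nat) + 1 : Nat) := by push_cast; ring
      rw [h]

-- loop invariant tying A's state to B's state
def mbInv (blocks cur : List String) (num : Int) (runs : List (List String)) (flag : Bool) : Prop :=
  (flag = false ∧ cur = [] ∧ blocks = mbWrapFrom 1 runs ∧ num = runs.length + 1)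
  ∨ (flag = true ∧ cur ≠ [] ∧ ∃ init, runs = init ++ [cur] ∧ blocks = mbWrapFrom 1 init ∧ num = init.length + 1)

lemma mb_main (lines : List String) :
    ∀ (blocks cur : List String) (num : Int) (runs : List (List String)) (flag : Bool),
      mbInv blocks cur num runs flag →
      (let st := lines.foldl mbStepA (blocks, cur, num)
       if st.2.1 ≠ [] then st.1 ++ [mbWrap st.2.2 (PySem.Str.join "\n" st.2.1)] else st.1)
        = mbWrapFrom 1 (lines.foldl mbStepB (runs, flag)).1 := by
  induction lines with
  | nil =>
      intro blocks cur num runs flag hinv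
      rcases hinv with ⟨_, hcur, hb, _⟩ | ⟨_, hcur, init, hruns, hb, hnum⟩
      · simp [List.foldl_nil, hcur, hb]
      · simp only [List.foldl_nil]
        rw [if_pos hcur, hb, hnum, hruns, mbWrapFrom_snoc]
        ring_nf
  | cons line rest ih =>
      intro blocks cur num runs flag hinv
      simp only [List.foldl_cons]
      by_cases hline : PySem.Str.strip line ≠ ""
      · rcases hinv with ⟨hf, hcur, hb, hnum⟩ | ⟨hf, hcur, init, hruns, hb, hnum⟩
        · -- not in a run: start a new run
          rw [show mbStepA (blocks, cur, num) line = (blocks, cur ++ [line], num) by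
                simp [mbStepA, hline],
              show mbStepB (runs, flag) line = (runs ++ [[line]], true) by
                simp [mbStepB, hline, hf]]
          apply ih
          refine Or.inr ⟨rfl, by simp [hcur], runs, by simp [hcur], hb, by simpa using hnum⟩
        · -- in a run: extend the last run
          rw [show mbStepA (blocks, cur, num) line = (blocks, cur ++ [line], num) by
                simp [mbStepA, hline],
              show mbStepB (runs, flag) line = (mbAppendLast runs line, true) by
                simp [mbStepB, hline, hf]]
          apply ih
          exact Or.inr ⟨rfl, by simp, init, by rw [hruns, mbAppendLast_snoc], hb, hnum⟩
      · simp only [ne_eq, not_not] at hline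
        rcases hinv with ⟨hf, hcur, hb, hnum⟩ | ⟨hf, hcur, init, hruns, hb, hnum⟩
        · -- blank line, no open block: both states unchanged
          rw [show mbStepA (blocks, cur, num) line = (blocks, cur, num) by
                simp [mbStepA, hline, hcur],
              show mbStepB (runs, flag) line = (runs, false) by simp [mbStepB, hline]]
          exact ih blocks cur num runs false (Or.inl ⟨rfl, hcur, hb, hnum⟩)
        · -- blank line closes the open block: A flushes it, B closes the run
          rw [show mbStepA (blocks, cur, num) line
                = (blocks ++ [mbWrap num (PySem.Str.join "\n" cur)], [], num + 1) by
                simp [mbStepA, hline, hcur],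
              show mbStepB (runs, flag) line = (runs, false) by simp [mbStepB, hline]]
          apply ih
          refine Or.inl ⟨rfl, rfl, ?_, ?_⟩
          · rw [hb, hnum, hruns, mbWrapFrom_snoc]; ring_nf
          · rw [hnum, hruns]; simp
-- ===== VERDICT (by name: the statement is the Claim_ definition above) =====
theorem map_blocks_py_spec : Claim_equal_map_blocks_py := by
  intro content _
  unfold Spec_map_blocks_py map_blocks_py map_blocks_py_alt
  exact mb_main (mbLines content) [] [] 1 [] false
    (Or.inl ⟨rfl, rfl, rfl, by simp⟩)
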